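-- pv_equiv track=rewrite | github.com/summer-intern-code/Traditional-trading-strategy | findp.py | cashflow
-- ===== SOURCE A (Python) =====
-- def cashflow(trade_pair,xamount,yamount):
--       x=trade_pair[0]
--       y=trade_pair[1]
--       cash=0
--       tolist=[]
--       cashlist=[]
--       for i in range(len(x)):
--           cashlist.append(cash)
--           positionx=sum(xamount[0:i+1])
--           positiony=sum(yamount[0:i+1])
--           if xamount[i]!=0 and yamount[i]!=0:
--              cash=cash-xamount[i]*x[i]-yamount[i]*y[i]#-0.0005(abs(xamount[i]*x[i])+abs(yamount[i]*y[i]))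
--           total=cash+positionx*x[i]+positiony*y[i]
--           tolist.append(total)
--       return tolist,cashlist
-- ===== SOURCE B (Python) =====
-- def cashflow(trade_pair, xamount, yamount):
--     # one pass carrying running prefix sums instead of re-summing slices each iteration
--     x = trade_pair[0]
--     y = trade_pair[1]
--     cash = px = py = 0
--     tolist = []
--     cashlist = []
--     for xi, yi, ai, bi in zip(x, y, xamount, yamount):
--         cashlist.append(cash)
--         px += ai
--         py += bi
--         if ai != 0 and bi != 0:
--             cash -= ai * xi + bi * yi
--         tolist.append(cash + px * xi + py * yi)
--     return tolist, cashlist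
-- ===== Notes on version B (the rewrite author's own statement) =====
-- stated objective: alternative
-- what changed: Replaces the per-iteration re-summation of xamount[0:i+1]/yamount[0:i+1] by running prefix-sum accumulators carried through a single zip pass over the four series, removing the inner scans.
import Mathlib
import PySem

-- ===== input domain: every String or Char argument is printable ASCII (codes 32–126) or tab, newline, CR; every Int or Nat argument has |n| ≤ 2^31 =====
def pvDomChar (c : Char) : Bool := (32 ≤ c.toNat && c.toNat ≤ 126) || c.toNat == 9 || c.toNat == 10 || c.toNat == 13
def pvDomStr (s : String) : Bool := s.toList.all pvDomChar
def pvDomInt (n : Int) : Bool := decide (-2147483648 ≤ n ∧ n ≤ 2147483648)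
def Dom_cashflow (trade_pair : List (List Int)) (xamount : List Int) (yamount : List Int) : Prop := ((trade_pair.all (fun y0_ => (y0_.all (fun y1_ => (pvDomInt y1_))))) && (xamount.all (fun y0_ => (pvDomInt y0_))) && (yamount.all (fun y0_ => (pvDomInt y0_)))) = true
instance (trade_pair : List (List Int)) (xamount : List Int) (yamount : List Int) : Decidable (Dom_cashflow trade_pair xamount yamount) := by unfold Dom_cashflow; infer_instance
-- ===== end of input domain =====

-- B replaces A's per-iteration slice re-summation by running prefix-sum accumulators in a single zip pass; return values proved equal on Pre_.

-- ===== PORT A =====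
-- loop body of A, factored for readability; i is the loop index
def cashflowStepA (x y xam yam : List Int) (s : Int × List Int × List Int) (i : Nat) : Int × List Int × List Int :=
  let cash := s.1
  let cashlist := s.2.2 ++ [cash]
  let positionx := (PySem.List.slice xam (some 0) (some ((i : Int) + 1))).sum
  let positiony := (PySem.List.slice yam (some 0) (some ((i : Int) + 1))).sum
  let xi := PySem.List.pyGetD x (i : Int) 0
  let yi := PySem.List.pyGetD y (i : Int) 0
  let ai := PySem.List.pyGetD xam (i : Int) 0
  let bi := PySem.List.pyGetD yam (i : Int) 0
  let cash := if ai ≠ 0 ∧ bi ≠ 0 then cash - ai * xi - bi * yi else cash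
  let total := cash + positionx * xi + positiony * yi
  (cash, s.2.1 ++ [total], cashlist)

def cashflow (trade_pair : List (List Int)) (xamount : List Int) (yamount : List Int) : List Int × List Int :=
  let x := (PySem.List.pyGet? trade_pair 0).getD []
  let y := (PySem.List.pyGet? trade_pair 1).getD []
  let s := (List.range x.length).foldl (cashflowStepA x y xamount yamount) (0, [], [])
  (s.2.1, s.2.2)

-- ===== PORT B =====
-- loop body of B: state is (cash, px, py, tolist, cashlist), q = (xi, (yi, (ai, bi)))
def cashflowStepB (s : Int × Int × Int × List Int × List Int) (q : Int × Int × Int × Int) :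
    Int × Int × Int × List Int × List Int :=
  let cash := s.1
  let cashlist := s.2.2.2.2 ++ [cash]
  let px := s.2.1 + q.2.2.1
  let py := s.2.2.1 + q.2.2.2
  let cash := if q.2.2.1 ≠ 0 ∧ q.2.2.2 ≠ 0 then cash - (q.2.2.1 * q.1 + q.2.2.2 * q.2.1) else cash
  (cash, px, py, s.2.2.2.1 ++ [cash + px * q.1 + py * q.2.1], cashlist)

def cashflow_alt (trade_pair : List (List Int)) (xamount : List Int) (yamount : List Int) : List Int × List Int :=
  let x := (PySem.List.pyGet? trade_pair 0).getD []
  let y := (PySem.List.pyGet? trade_pair 1).getD []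
  let s := (x.zip (y.zip (xamount.zip yamount))).foldl cashflowStepB (0, 0, 0, [], [])
  (s.2.2.2.1, s.2.2.2.2)

-- ===== PRECONDITION & SPEC =====
-- Pre_ is exactly where Python A returns: trade_pair needs two rows, and indexing y/xamount/yamount
-- at every i < len(x) must not raise IndexError.
def Pre_cashflow (trade_pair : List (List Int)) (xamount : List Int) (yamount : List Int) : Prop :=
  2 ≤ trade_pair.length ∧
  (trade_pair.getD 0 []).length ≤ (trade_pair.getD 1 []).length ∧
  (trade_pair.getD 0 []).length ≤ xamount.length ∧
  (trade_pair.getD 0 []).length ≤ yamount.length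
instance (trade_pair : List (List Int)) (xamount : List Int) (yamount : List Int) : Decidable (Pre_cashflow trade_pair xamount yamount) := by unfold Pre_cashflow; infer_instance

def pvWitness_cashflow : List (List Int) × List Int × List Int := ([[2, -1], [3, 4]], [1, 0], [1, 2])

def Spec_cashflow (trade_pair : List (List Int)) (xamount : List Int) (yamount : List Int) (out : List Int × List Int) : Prop := out = cashflow_alt trade_pair xamount yamount
instance (trade_pair : List (List Int)) (xamount : List Int) (yamount : List Int) (out : List Int × List Int) : Decidable (Spec_cashflow trade_pair xamount yamount out) := by unfold Spec_cashflow; infer_instance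

-- ===== CLAIM (what is proved, stated in full; the proofs are below) =====
def Claim_equal_cashflow : Prop := ∀ (trade_pair : List (List Int)) (xamount : List Int) (yamount : List Int), Dom_cashflow trade_pair xamount yamount → Pre_cashflow trade_pair xamount yamount → Spec_cashflow trade_pair xamount yamount (cashflow trade_pair xamount yamount)

-- ===== LEMMAS AND PROOFS =====

-- The two loops agree step by step: after n iterations B's state is A's state plus the prefix sums.
lemma cashflow_loop_eq (x y xam yam : List Int) (n : Nat)
    (hx : n ≤ x.length) (hy : n ≤ y.length) (ha : n ≤ xam.length) (hb : n ≤ yam.length) :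
    ((x.zip (y.zip (xam.zip yam))).take n).foldl cashflowStepB (0, 0, 0, [], []) =
      (let a := (List.range n).foldl (cashflowStepA x y xam yam) (0, [], []);
       (a.1, (xam.take n).sum, (yam.take n).sum, a.2.1, a.2.2)) := by
  induction n with
  | zero => simp
  | succ n ih =>
    have hx' : n < x.length := by omega
    have hy' : n < y.length := by omega
    have ha' : n < xam.length := by omega
    have hb' : n < yam.length := by omega
    have hz : n < (x.zip (y.zip (xam.zip yam))).length := by
      simp [List.length_zip]; omega
    have ht : (x.zip (y.zip (xam.zip yam))).take (n + 1) =
        (x.zip (y.zip (xam.zip yam))).take n ++ [(x[n], (y[n], (xam[n], yam[n])))] := by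
      rw [List.take_add_one]
      simp [List.getElem?_eq_getElem hz, List.getElem_zip]
    rw [ht, List.range_succ, List.foldl_append, List.foldl_append,
        ih (by omega) (by omega) (by omega) (by omega)]
    have hsum : ∀ (l : List Int) (h : n < l.length),
        (l.take (n + 1)).sum = (l.take n).sum + l[n] := by
      intro l h
      exact List.sum_take_succ l n h
    have hslice : ∀ (l : List Int), PySem.List.slice l (some 0) (some ((n : Int) + 1)) = l.take (n + 1) := by
      intro l
      have : ((n : Int) + 1) = ((n + 1 : Nat) : Int) := by push_cast; ring
      rw [this, PySem.List.slice_zero_start, PySem.List.slice_to_natCast]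
    simp only [List.foldl_cons, List.foldl_nil, cashflowStepA, cashflowStepB,
      hslice, hsum xam ha', hsum yam hb',
      PySem.List.pyGetD_natCast, List.getD_eq_getElem?_getD, List.getElem?_eq_getElem,
      hx', hy', ha', hb', Option.getD_some, sub_add_eq_sub_sub]

-- ===== VERDICT (by name: the statement is the Claim_ definition above) =====
theorem cashflow_spec : Claim_equal_cashflow := by
  intro tp xam yam _ hpre
  obtain ⟨h2, hy, ha, hb⟩ := hpre
  unfold Spec_cashflow cashflow cashflow_alt
  have hx0 : (PySem.List.pyGet? tp 0).getD [] = tp.getD 0 [] := by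
    cases tp <;> simp [PySem.List.pyGet?, PySem.List.pyIdx?]
  have hy0 : (PySem.List.pyGet? tp 1).getD [] = tp.getD 1 [] := by
    match tp with
    | [] => simp at h2
    | [a] => simp at h2
    | a :: b :: t => simp [PySem.List.pyGet?, PySem.List.pyIdx?]
  set x := tp.getD 0 [] with hxdef
  set y := tp.getD 1 [] with hydef
  rw [hx0, hy0]
  have hlen : (x.zip (y.zip (xam.zip yam))).length = x.length := by
    simp [List.length_zip]; omega
  have htake : (x.zip (y.zip (xam.zip yam))).take x.length = x.zip (y.zip (xam.zip yam)) := by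
    apply List.take_of_length_le; omega
  have hmain := cashflow_loop_eq x y xam yam x.length (le_refl _) hy ha hb
  rw [htake] at hmain
  dsimp only
  rw [hmain]
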